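-- pv_equiv track=rewrite | github.com/Zjlong-1/2024fall-cs101 | Previous practices/1115取石子.py | solve
-- ===== SOURCE A (Python) =====
-- def solve(a,b):
--     a,b=min(a,b),max(a,b)
--     if b%a==0:
--         return True
--     k=b//a
--     if k>=2:
--         return True
--     else:
--         return not solve(a,b-a)
-- ===== SOURCE B (Python) =====
-- def solve(a, b):
--     a, b = min(a, b), max(a, b)
--     # Euclid's game closed form: mover wins iff a | b or b/a exceeds the golden ratio,
--     # i.e. b*b > a*b + a*a (equality is impossible for integers).
--     return b % a == 0 or b * b > a * b + a * a
-- ===== Notes on version B (the rewrite author's own statement) =====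
-- stated objective: alternative
-- what changed: Replaced A's recursion by the O(1) golden-ratio closed form of Euclid's game: after sorting, the mover wins iff a divides b or b*b > a*b + a*a.
import Mathlib
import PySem

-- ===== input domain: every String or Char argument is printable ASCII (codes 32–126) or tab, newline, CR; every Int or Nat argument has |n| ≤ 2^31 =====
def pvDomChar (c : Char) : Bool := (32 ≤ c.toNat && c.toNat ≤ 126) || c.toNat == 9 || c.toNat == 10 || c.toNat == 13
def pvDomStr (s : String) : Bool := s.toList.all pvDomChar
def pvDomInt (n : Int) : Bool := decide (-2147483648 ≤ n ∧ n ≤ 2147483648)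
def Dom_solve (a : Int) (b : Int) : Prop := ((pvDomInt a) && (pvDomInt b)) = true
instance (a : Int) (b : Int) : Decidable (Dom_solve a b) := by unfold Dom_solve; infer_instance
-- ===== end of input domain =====

-- B replaces A's recursion by the golden-ratio closed form of Euclid's game (different algorithm, constant-time formula).


-- ===== PORT A =====
-- A's recursion, made total with fuel (inside Pre_ the fuel a.toNat+b.toNat+1 is never exhausted,
-- since the larger argument strictly decreases at each recursive call).
def solveF : Nat → Int → Int → Bool
  | 0, _, _ => false
  | n + 1, a, b =>
    let a' := min a b
    let b' := max a b
    if PySem.Int.mod b' a' = 0 then true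
    else
      let k := PySem.Int.floordiv b' a'
      if k ≥ 2 then true
      else !(solveF n a' (b' - a'))

def solve (a : Int) (b : Int) : Bool := solveF (a.toNat + b.toNat + 1) a b

-- ===== PORT B =====
-- B's closed form: after sorting, the mover wins iff a' divides b' or b'*b' > a'*b' + a'*a'.
def solve_alt (a : Int) (b : Int) : Bool :=
  let a' := min a b
  let b' := max a b
  (PySem.Int.mod b' a' == 0) || decide (b' * b' > a' * b' + a' * a')

-- ===== PRECONDITION & SPEC =====
-- Pre_: either both arguments positive, or min(a,b) negative and dividing max(a,b) (then A hits
-- the b%a==0 base case at once). With min(a,b) = 0 Python A raises ZeroDivisionError, and with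
-- min(a,b) < 0 not dividing max(a,b) the recursion never terminates (RecursionError).
def Pre_solve (a : Int) (b : Int) : Prop := 1 ≤ min a b ∨ (min a b < 0 ∧ min a b ∣ max a b)
instance (a : Int) (b : Int) : Decidable (Pre_solve a b) := by unfold Pre_solve; infer_instance
def pvWitness_solve : Int × Int := (3, 7)
def Spec_solve (a : Int) (b : Int) (out : Bool) : Prop := out = solve_alt a b
instance (a : Int) (b : Int) (out : Bool) : Decidable (Spec_solve a b out) := by unfold Spec_solve; infer_instance

-- ===== CLAIM (what is proved, stated in full; the proofs are below) =====
def Claim_equal_solve : Prop := ∀ (a : Int) (b : Int), Dom_solve a b → Pre_solve a b → Spec_solve a b (solve a b)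

-- ===== LEMMAS AND PROOFS =====
-- No positive integers satisfy c*m + c*c = m*m (the golden ratio is irrational): infinite descent.
lemma noGoldenNat : ∀ m c : ℕ, 0 < c → c < m → c * m + c * c ≠ m * m := by
  intro m
  induction m using Nat.strong_induction_on with
  | _ m ih =>
    intro c hc hcm heq
    obtain ⟨d, rfl⟩ : ∃ d, m = c + d := ⟨m - c, by omega⟩
    have h2 : c * c = c * d + d * d := by nlinarith [heq]
    have hd : 0 < d := by nlinarith
    have hdc : d < c := by nlinarith
    exact ih c hcm d hd hdc (by nlinarith [h2])

lemma noGoldenInt (c m : Int) (hc : 0 < c) (hcm : c < m) : c * m + c * c ≠ m * m := by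
  intro heq
  have hc' : c = (c.toNat : Int) := (Int.toNat_of_nonneg hc.le).symm
  have hm' : m = (m.toNat : Int) := (Int.toNat_of_nonneg (by omega : (0:Int) ≤ m)).symm
  apply noGoldenNat m.toNat c.toNat (by omega) (by omega)
  have : ((c.toNat * m.toNat + c.toNat * c.toNat : ℕ) : Int) = ((m.toNat * m.toNat : ℕ) : Int) := by
    push_cast; rw [← hc', ← hm']; exact heq
  exact_mod_cast this

-- A's recursion equals the closed form on sorted positive inputs, given enough fuel.
lemma solveF_closed : ∀ n : Nat, ∀ a b : Int, 1 ≤ min a b → (max a b).toNat < n →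
    solveF n a b = ((PySem.Int.mod (max a b) (min a b) == 0)
      || decide ((max a b) * (max a b) > (min a b) * (max a b) + (min a b) * (min a b))) := by
  intro n
  induction n with
  | zero => intro a b _ hf; omega
  | succ n ih =>
    intro a b hmin hfuel
    set m := min a b with hm
    set M := max a b with hM
    have hmM : m ≤ M := min_le_max
    have hm1 : 1 ≤ m := hmin
    simp only [solveF, ← hm, ← hM]
    by_cases h1 : PySem.Int.mod M m = 0
    · simp [h1]
    · have hndvd : ¬ m ∣ M := fun h => h1 ((PySem.Int.mod_eq_zero_iff_dvd M m).mpr h)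
      have hmltM : m < M := lt_of_le_of_ne hmM (fun h => hndvd (h ▸ dvd_refl m))
      by_cases h2 : PySem.Int.floordiv M m ≥ 2
      · have hb : 2 * m ≤ M := (PySem.Int.le_floordiv_iff_mul_le (by omega)).mp h2
        have : M * M > m * M + m * m := by nlinarith
        simp [h1, h2, this]
      · have hb : M < 2 * m := by
          have := (PySem.Int.le_floordiv_iff_mul_le (q := 2) (a := M) (b := m) (by omega)).mpr
          by_contra hcon
          exact h2 (this (by omega))
        set c := M - m with hc
        have hc0 : 0 < c := by omega
        have hcm : c < m := by omega
        have hmin' : min m c = c := min_eq_right hcm.le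
        have hmax' : max m c = m := max_eq_left hcm.le
        have ihr := ih m c (by rw [hmin']; omega) (by rw [hmax']; omega)
        rw [hmin', hmax'] at ihr
        simp only [h1, h2, if_false, ihr]
        have hne := noGoldenInt c m hc0 hcm
        by_cases hdv : c ∣ m
        · -- c divides m: inner mod is 0, and m = q*c with q ≥ 2 forces M*M ≤ m*M + m*m
          have hmod : PySem.Int.mod m c = 0 := (PySem.Int.mod_eq_zero_iff_dvd m c).mpr hdv
          obtain ⟨q, hq⟩ := hdv
          have hq2 : 2 ≤ q := by nlinarith
          have hle : ¬ (M * M > m * M + m * m) := by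
            have hMc : M = m + c := by omega
            nlinarith
          simp [hmod, hle, h1]
        · have hmodne : PySem.Int.mod m c ≠ 0 :=
            fun h => hdv ((PySem.Int.mod_eq_zero_iff_dvd m c).mp h)
          have hMc : M = m + c := by omega
          have key : (M * M > m * M + m * m) ↔ ¬ (m * m > c * m + c * c) := by
            constructor
            · intro h hcon; nlinarith
            · intro h
              have : c * m + c * c ≥ m * m := by omega
              have : c * m + c * c > m * m := lt_of_le_of_ne this (Ne.symm hne)
              nlinarith
          by_cases hin : m * m > c * m + c * c
          · simp [hin, h1, key.not_left.mpr (by simpa using hin)]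
          · simp [hmodne, hin, key.mpr hin]

-- ===== VERDICT (by name: the statement is the Claim_ definition above) =====
theorem solve_spec : Claim_equal_solve := by
  intro a b _ hpre
  unfold Spec_solve solve solve_alt
  rcases hpre with hpos | ⟨hneg, hdvd⟩
  · have h1 : 1 ≤ a := le_trans hpos (min_le_left a b)
    have h2 : 1 ≤ b := le_trans hpos (min_le_right a b)
    have hfuel : (max a b).toNat < a.toNat + b.toNat + 1 := by
      rcases le_total a b with h | h
      · rw [max_eq_right h]; omega
      · rw [max_eq_left h]; omega
    rw [solveF_closed (a.toNat + b.toNat + 1) a b hpos hfuel]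
  · have hmod : PySem.Int.mod (max a b) (min a b) = 0 :=
      (PySem.Int.mod_eq_zero_iff_dvd _ _).mpr hdvd
    simp [solveF, hmod]
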